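-- pv_equiv track=rewrite | github.com/dianisay/Applied-Computational-Science-Algorithms | gray2real_algoritmogenetico.py | gray2real
-- ===== SOURCE A (Python) =====
-- def gray2real(indiv,vari,g_len):
--     g=[]
--     b=[]
--     R=[]
--     for i in range(vari): #obtener gray, binario y decimal de cada variable (gen)
--         g.append(indiv[i*g_len:(i+1)*g_len]) #seccionar el cromosoma en el gen correspondiente
--         #pasar a binario
--         bi=[]
--         bi.append(g[i][0])
--         for j in range(g_len-1):
--             bi.append(int(bi[j])^int(g[i][j+1]))
--         #pasar a decimal
--         di=0
--         for k in range(g_len):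
--             di+=bi[k]*2**(g_len-1-k)
-- #         ri=(di*amp/(2**g_len-1))+inf #escalar el decimal en el rango
--         b.append(bi)
--         R.append(di)
--     return R
-- ===== SOURCE B (Python) =====
-- def gray2real(indiv, vari, g_len):
--     # One fused pass per gene: Horner accumulation of the Gray-decoded bits,
--     # no intermediate binary list and no power computations.
--     R = []
--     for i in range(vari):
--         gene = indiv[i * g_len:(i + 1) * g_len]
--         prev = gene[0]
--         di = prev
--         for x in gene[1:]:
--             prev = int(prev) ^ int(x)
--             di = di * 2 + prev
--         R.append(di)
--     return R
-- ===== Notes on version B (the rewrite author's own statement) =====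
-- stated objective: simpler
-- what changed: Per gene, A builds an intermediate Gray-to-binary bit list by indexing and then a second power-weighted summation loop; B fuses both into a single Horner-style pass carrying (previous bit, accumulated decimal); Pre_ restricts to the natural domain (g_len >= 1 and a chromosome long enough for all genes, or vari <= 0), outside which A raises IndexError or, for negative g_len, returns an accidental all-zeros list produced by its empty inner ranges.
-- outside the precondition, e.g. on gray2real([7, 1, 2476], 1, -2): A returns [0], B returns [7]
import Mathlib
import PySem

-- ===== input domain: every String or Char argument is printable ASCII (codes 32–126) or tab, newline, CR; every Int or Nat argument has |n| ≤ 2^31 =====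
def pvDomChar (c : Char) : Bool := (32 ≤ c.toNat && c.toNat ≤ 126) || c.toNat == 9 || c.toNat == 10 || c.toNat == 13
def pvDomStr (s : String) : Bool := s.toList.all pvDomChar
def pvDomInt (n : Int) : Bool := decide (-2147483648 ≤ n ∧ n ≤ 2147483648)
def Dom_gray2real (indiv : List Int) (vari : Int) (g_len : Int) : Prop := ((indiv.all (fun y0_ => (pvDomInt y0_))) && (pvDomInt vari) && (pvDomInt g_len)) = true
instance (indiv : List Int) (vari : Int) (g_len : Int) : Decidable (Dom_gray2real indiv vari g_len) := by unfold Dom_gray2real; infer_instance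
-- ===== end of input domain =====

-- B fuses A's two inner loops into one Horner-style accumulating pass per gene (objective: simpler).

-- ===== PORT A =====
-- literal port of A: state (g, b, R); inner loop 1 builds the binary list bi by
-- indexing, inner loop 2 accumulates the power-weighted decimal sum.
def gray2real (indiv : List Int) (vari : Int) (g_len : Int) : List Int :=
  let st := (PySem.List.pyRange 0 vari).foldl
    (fun (st : List (List Int) × List (List Int) × List Int) i =>
      let g := st.1 ++ [PySem.List.slice indiv (some (i * g_len)) (some ((i + 1) * g_len))]
      let gi := PySem.List.pyGetD g i ([] : List Int)
      let bi0 := [PySem.List.pyGetD gi 0 0]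
      let bi := (PySem.List.pyRange 0 (g_len - 1)).foldl
        (fun bi j => bi ++ [PySem.Int.bxor (PySem.List.pyGetD bi j 0) (PySem.List.pyGetD gi (j + 1) 0)]) bi0
      let di := (PySem.List.pyRange 0 g_len).foldl
        (fun di k => di + PySem.List.pyGetD bi k 0 * 2 ^ (g_len - 1 - k).toNat) 0
      (g, st.2.1 ++ [bi], st.2.2 ++ [di]))
    ([], [], [])
  st.2.2

-- ===== PORT B =====
-- literal port of Source B: one fused pass per gene carrying (prev, di).
def gray2real_alt (indiv : List Int) (vari : Int) (g_len : Int) : List Int :=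
  (PySem.List.pyRange 0 vari).foldl
    (fun R i =>
      let gene := PySem.List.slice indiv (some (i * g_len)) (some ((i + 1) * g_len))
      let prev := PySem.List.pyGetD gene 0 0
      let st := (PySem.List.slice gene (some 1) none).foldl
        (fun (pd : Int × Int) x =>
          let p := PySem.Int.bxor pd.1 x
          (p, pd.2 * 2 + p)) (prev, prev)
      R ++ [st.2]) []

-- ===== PRECONDITION & SPEC =====
-- Pre_ restricts to the natural domain: g_len >= 1 with every gene slice full (or a
-- trivial vari <= 0); outside it A raises IndexError, except for negative g_len where a
-- nonempty slice can survive and A's empty inner ranges yield an accidental all-zeros list.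
def Pre_gray2real (indiv : List Int) (vari : Int) (g_len : Int) : Prop :=
  vari ≤ 0 ∨ (1 ≤ g_len ∧ vari * g_len ≤ indiv.length)
instance (indiv : List Int) (vari : Int) (g_len : Int) : Decidable (Pre_gray2real indiv vari g_len) := by unfold Pre_gray2real; infer_instance

def pvWitness_gray2real : List Int × Int × Int := ([1, 0, 1, 1, 1, 0], 2, 3)

def Spec_gray2real (indiv : List Int) (vari : Int) (g_len : Int) (out : List Int) : Prop := out = gray2real_alt indiv vari g_len
instance (indiv : List Int) (vari : Int) (g_len : Int) (out : List Int) : Decidable (Spec_gray2real indiv vari g_len out) := by unfold Spec_gray2real; infer_instance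

-- ===== CLAIM (what is proved, stated in full; the proofs are below) =====
def Claim_equal_gray2real : Prop := ∀ (indiv : List Int) (vari : Int) (g_len : Int), Dom_gray2real indiv vari g_len → Pre_gray2real indiv vari g_len → Spec_gray2real indiv vari g_len (gray2real indiv vari g_len)

-- ===== LEMMAS AND PROOFS =====

-- the Gray-decoded bit list: gbits x ys = A's bi for a gene x :: ys
def gbits (x : Int) : List Int → List Int
  | [] => [x]
  | y :: t => x :: gbits (PySem.Int.bxor x y) t

theorem gbits_length (x : Int) (ys : List Int) : (gbits x ys).length = ys.length + 1 := by
  induction ys generalizing x with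
  | nil => rfl
  | cons y t ih => simp [gbits, ih]

theorem gbits_snoc (x : Int) (ys : List Int) (y : Int) :
    gbits x (ys ++ [y]) = gbits x ys ++ [PySem.Int.bxor (ys.foldl PySem.Int.bxor x) y] := by
  induction ys generalizing x with
  | nil => rfl
  | cons z t ih => simp [gbits, ih]

theorem gbits_getLast (x : Int) (ys : List Int) :
    (gbits x ys).getD ys.length 0 = ys.foldl PySem.Int.bxor x := by
  induction ys generalizing x with
  | nil => rfl
  | cons y t ih => simpa [gbits] using ih (PySem.Int.bxor x y)

-- A's first inner loop builds exactly gbits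
theorem innerA_eq_gbits (x : Int) (ys : List Int) (n : Nat) (hn : n ≤ ys.length) :
    (PySem.List.pyRange 0 (n : Int)).foldl
      (fun bi j => bi ++ [PySem.Int.bxor (PySem.List.pyGetD bi j 0)
        (PySem.List.pyGetD (x :: ys) (j + 1) 0)]) [x] = gbits x (ys.take n) := by
  induction n with
  | zero => rfl
  | succ m ih =>
    rw [show ((m + 1 : Nat) : Int) = (m : Int) + 1 by push_cast; ring,
      PySem.List.pyRange_one_succ_right (by positivity), List.foldl_append, ih (by omega)]
    have hm : m < ys.length := by omega
    have h1 : PySem.List.pyGetD (gbits x (ys.take m)) (m : Int) 0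
        = (ys.take m).foldl PySem.Int.bxor x := by
      rw [PySem.List.pyGetD_natCast]
      simpa [List.length_take, Nat.min_eq_left (le_of_lt hm)] using gbits_getLast x (ys.take m)
    have h2 : PySem.List.pyGetD (x :: ys) ((m : Int) + 1) 0 = ys[m] := by
      rw [show ((m : Int) + 1) = ((m + 1 : Nat) : Int) by push_cast; ring,
        PySem.List.pyGetD_natCast]
      simp [List.getD, hm]
    rw [List.foldl_cons, h1, h2, List.foldl_nil,
      ← gbits_snoc, ← List.take_succ_eq_append_getElem hm]

-- Horner fold with an arbitrary seed
theorem horner_seed (bs : List Int) (a : Int) :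
    bs.foldl (fun d b => d * 2 + b) a = a * 2 ^ bs.length + bs.foldl (fun d b => d * 2 + b) 0 := by
  induction bs generalizing a with
  | nil => simp
  | cons b t ih =>
    rw [List.foldl_cons, List.foldl_cons, ih (a * 2 + b), ih (0 * 2 + b)]
    push_cast [List.length_cons]
    ring

-- A's weighted sum equals the Horner fold
theorem weighted_eq_horner (bs : List Int) :
    ((List.range bs.length).map (fun k => bs.getD k 0 * 2 ^ (bs.length - 1 - k))).sum
      = bs.foldl (fun d b => d * 2 + b) 0 := by
  induction bs with
  | nil => rfl
  | cons b t ih =>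
    rw [List.length_cons, List.range_succ_eq_map, List.map_cons, List.map_map, List.sum_cons]
    have : ((List.range t.length).map ((fun k => (b :: t).getD k 0 * 2 ^ (t.length + 1 - 1 - k)) ∘ Nat.succ)).sum
        = ((List.range t.length).map (fun k => t.getD k 0 * 2 ^ (t.length - 1 - k))).sum := by
      apply congrArg
      apply List.map_congr_left
      intro k hk
      simp only [List.mem_range] at hk
      simp only [Function.comp]
      have e1 : (b :: t).getD (k + 1) 0 = t.getD k 0 := by simp [List.getD]
      have e2 : t.length + 1 - 1 - (k + 1) = t.length - 1 - k := by omega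
      rw [e1, e2]
    rw [this, ih, List.foldl_cons, horner_seed t (0 * 2 + b)]
    simp [List.getD]

-- A's second inner loop on bi = gbits equals B's Horner value
theorem innerA_sum (g_len : Int) (hg : 1 ≤ g_len) (bs : List Int)
    (hlen : bs.length = g_len.toNat) :
    (PySem.List.pyRange 0 g_len).foldl
      (fun di k => di + PySem.List.pyGetD bs k 0 * 2 ^ (g_len - 1 - k).toNat) 0
      = bs.foldl (fun d b => d * 2 + b) 0 := by
  obtain ⟨n, rfl⟩ : ∃ n : Nat, g_len = (n : Int) := ⟨g_len.toNat, by omega⟩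
  simp only [Int.toNat_natCast] at hlen
  rw [PySem.List.pyRange_zero_natCast, PySem.List.foldl_add, List.map_map,
    ← weighted_eq_horner bs, hlen]
  simp only [zero_add]
  apply congrArg
  apply List.map_congr_left
  intro k hk
  simp only [List.mem_range] at hk
  simp only [Function.comp]
  have he : ((n : Int) - 1 - (k : Int)).toNat = n - 1 - k := by omega
  rw [PySem.List.pyGetD_natCast, he]

theorem gbits_head (x : Int) (ys : List Int) : gbits x ys = x :: (gbits x ys).tail := by
  cases ys <;> rfl

-- B's fused pass computes the Horner fold of gbits
theorem foldB_eq (ys : List Int) (x d : Int) :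
    (ys.foldl (fun (pd : Int × Int) y =>
        (PySem.Int.bxor pd.1 y, pd.2 * 2 + PySem.Int.bxor pd.1 y)) (x, d)).2
      = (gbits x ys).tail.foldl (fun a b => a * 2 + b) d := by
  induction ys generalizing x d with
  | nil => rfl
  | cons y t ih =>
    simp only [List.foldl_cons, gbits, List.tail_cons]
    rw [ih]
    conv_rhs => rw [gbits_head (PySem.Int.bxor x y) t]
    rw [List.foldl_cons]

-- per-gene equality: A's decimal = B's decimal, for a full-length gene
theorem gene_eq (gi : List Int) (g_len : Int) (hg : 1 ≤ g_len)
    (hlen : gi.length = g_len.toNat) :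
    (PySem.List.pyRange 0 g_len).foldl
      (fun di k => di + PySem.List.pyGetD
        ((PySem.List.pyRange 0 (g_len - 1)).foldl
          (fun bi j => bi ++ [PySem.Int.bxor (PySem.List.pyGetD bi j 0)
            (PySem.List.pyGetD gi (j + 1) 0)]) [PySem.List.pyGetD gi 0 0]) k 0
        * 2 ^ (g_len - 1 - k).toNat) 0
      = ((PySem.List.slice gi (some 1) none).foldl
          (fun (pd : Int × Int) x =>
            (PySem.Int.bxor pd.1 x, pd.2 * 2 + PySem.Int.bxor pd.1 x))
          (PySem.List.pyGetD gi 0 0, PySem.List.pyGetD gi 0 0)).2 := by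
  obtain ⟨x, ys, rfl⟩ : ∃ x ys, gi = x :: ys := by
    cases gi with
    | nil => exfalso; simp at hlen; omega
    | cons a t => exact ⟨a, t, rfl⟩
  have hx : PySem.List.pyGetD (x :: ys) 0 0 = x := PySem.List.pyGetD_zero_cons x ys 0
  have hys : ys.length = g_len.toNat - 1 := by simp at hlen; omega
  have hbi : (PySem.List.pyRange 0 (g_len - 1)).foldl
      (fun bi j => bi ++ [PySem.Int.bxor (PySem.List.pyGetD bi j 0)
        (PySem.List.pyGetD (x :: ys) (j + 1) 0)]) [PySem.List.pyGetD (x :: ys) 0 0]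
      = gbits x ys := by
    rw [hx, show g_len - 1 = ((g_len.toNat - 1 : Nat) : Int) by omega,
      innerA_eq_gbits x ys (g_len.toNat - 1) (by omega)]
    rw [show ys.take (g_len.toNat - 1) = ys from List.take_of_length_le (by omega)]
  rw [hbi, innerA_sum g_len hg (gbits x ys) (by rw [gbits_length]; omega)]
  rw [PySem.List.slice_from_one, List.tail_cons, hx, foldB_eq]
  conv_lhs => rw [gbits_head x ys]
  rw [List.foldl_cons]
  norm_num

-- per-gene values as named functions (proof helpers)
def pvGene (indiv : List Int) (g_len : Int) (i : Nat) : List Int :=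
  PySem.List.slice indiv (some ((i : Int) * g_len)) (some (((i : Int) + 1) * g_len))

def pvBi (gi : List Int) (g_len : Int) : List Int :=
  (PySem.List.pyRange 0 (g_len - 1)).foldl
    (fun bi j => bi ++ [PySem.Int.bxor (PySem.List.pyGetD bi j 0)
      (PySem.List.pyGetD gi (j + 1) 0)]) [PySem.List.pyGetD gi 0 0]

def pvDiA (gi : List Int) (g_len : Int) : Int :=
  (PySem.List.pyRange 0 g_len).foldl
    (fun di k => di + PySem.List.pyGetD (pvBi gi g_len) k 0 * 2 ^ (g_len - 1 - k).toNat) 0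

def pvDiB (gi : List Int) : Int :=
  ((PySem.List.slice gi (some 1) none).foldl
    (fun (pd : Int × Int) x =>
      (PySem.Int.bxor pd.1 x, pd.2 * 2 + PySem.Int.bxor pd.1 x))
    (PySem.List.pyGetD gi 0 0, PySem.List.pyGetD gi 0 0)).2

theorem getD_append_length {α : Type} (l : List α) (x d : α) :
    (l ++ [x]).getD l.length d = x := by
  simp [List.getD]

-- A's outer loop, unrolled to maps over List.range
theorem foldA_eq (indiv : List Int) (g_len : Int) (n : Nat) :
    (PySem.List.pyRange 0 (n : Int)).foldl
      (fun (st : List (List Int) × List (List Int) × List Int) i =>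
        let g := st.1 ++ [PySem.List.slice indiv (some (i * g_len)) (some ((i + 1) * g_len))]
        let gi := PySem.List.pyGetD g i ([] : List Int)
        let bi0 := [PySem.List.pyGetD gi 0 0]
        let bi := (PySem.List.pyRange 0 (g_len - 1)).foldl
          (fun bi j => bi ++ [PySem.Int.bxor (PySem.List.pyGetD bi j 0) (PySem.List.pyGetD gi (j + 1) 0)]) bi0
        let di := (PySem.List.pyRange 0 g_len).foldl
          (fun di k => di + PySem.List.pyGetD bi k 0 * 2 ^ (g_len - 1 - k).toNat) 0
        (g, st.2.1 ++ [bi], st.2.2 ++ [di]))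
      ([], [], [])
    = ((List.range n).map (pvGene indiv g_len),
       (List.range n).map (fun i => pvBi (pvGene indiv g_len i) g_len),
       (List.range n).map (fun i => pvDiA (pvGene indiv g_len i) g_len)) := by
  induction n with
  | zero => rfl
  | succ m ih =>
    rw [show ((m + 1 : Nat) : Int) = (m : Int) + 1 by push_cast; ring,
      PySem.List.pyRange_one_succ_right (by positivity), List.foldl_append, ih,
      List.range_succ, List.map_append, List.map_append, List.map_append]
    simp only [List.foldl_cons, List.foldl_nil, List.map_cons, List.map_nil]
    have hgi : PySem.List.pyGetD
        ((List.range m).map (pvGene indiv g_len) ++ [PySem.List.slice indiv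
          (some ((m : Int) * g_len)) (some (((m : Int) + 1) * g_len))]) (m : Int) ([] : List Int)
        = pvGene indiv g_len m := by
      rw [PySem.List.pyGetD_natCast]
      have := getD_append_length ((List.range m).map (pvGene indiv g_len))
        (pvGene indiv g_len m) ([] : List Int)
      simpa [pvGene, List.length_map] using this
    simp only [pvGene] at hgi ⊢
    rw [hgi]
    rfl

-- B's outer loop, unrolled to a map over List.range
theorem foldB_outer_eq (indiv : List Int) (g_len : Int) (n : Nat) :
    (PySem.List.pyRange 0 (n : Int)).foldl
      (fun R i =>
        let gene := PySem.List.slice indiv (some (i * g_len)) (some ((i + 1) * g_len))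
        let prev := PySem.List.pyGetD gene 0 0
        let st := (PySem.List.slice gene (some 1) none).foldl
          (fun (pd : Int × Int) x =>
            let p := PySem.Int.bxor pd.1 x
            (p, pd.2 * 2 + p)) (prev, prev)
        R ++ [st.2]) []
    = (List.range n).map (fun i => pvDiB (pvGene indiv g_len i)) := by
  induction n with
  | zero => rfl
  | succ m ih =>
    rw [show ((m + 1 : Nat) : Int) = (m : Int) + 1 by push_cast; ring,
      PySem.List.pyRange_one_succ_right (by positivity), List.foldl_append, ih,
      List.range_succ, List.map_append]
    rfl

-- a full-length gene slice really has length g_len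
theorem pvGene_length (indiv : List Int) (g_len : Int) (hg : 1 ≤ g_len) (i n : Nat)
    (hi : i < n) (hlen : (n : Int) * g_len ≤ indiv.length) :
    (pvGene indiv g_len i).length = g_len.toNat := by
  obtain ⟨L, rfl⟩ : ∃ L : Nat, g_len = (L : Int) := ⟨g_len.toNat, by omega⟩
  have h1 : ((i : Int)) * (L : Int) = ((i * L : Nat) : Int) := by push_cast; ring
  have h2 : ((i : Int) + 1) * (L : Int) = ((i * L : Nat) : Int) + (L : Int) := by push_cast; ring
  rw [pvGene, h1, h2, PySem.List.slice_natCast_add]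
  have : i * L + L ≤ indiv.length := by
    have hL : 0 ≤ (L : Int) := by positivity
    have hin : ((i : Int) + 1) ≤ (n : Int) := by exact_mod_cast hi
    have hL : (0 : Int) ≤ (L : Int) := by positivity
    have : ((i * L + L : Nat) : Int) ≤ ((n : Nat) : Int) * (L : Int) := by
      push_cast
      nlinarith
    omega
  simp [List.length_take, List.length_drop]
  omega

-- ===== VERDICT (by name: the statement is the Claim_ definition above) =====
theorem gray2real_spec : Claim_equal_gray2real := by
  intro indiv vari g_len _ hpre
  unfold Spec_gray2real
  by_cases hv : vari ≤ 0
  · unfold gray2real gray2real_alt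
    rw [PySem.List.pyRange_one_eq_nil hv]
    rfl
  · obtain ⟨n, rfl⟩ : ∃ n : Nat, vari = (n : Int) := ⟨vari.toNat, by omega⟩
    obtain ⟨hg, hlen⟩ : 1 ≤ g_len ∧ (n : Int) * g_len ≤ indiv.length := by
      rcases hpre with h | h
      · omega
      · exact h
    rw [show gray2real indiv (n : Int) g_len
        = (List.range n).map (fun i => pvDiA (pvGene indiv g_len i) g_len) by
      unfold gray2real; rw [foldA_eq indiv g_len n]]
    rw [show gray2real_alt indiv (n : Int) g_len
        = (List.range n).map (fun i => pvDiB (pvGene indiv g_len i)) by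
      unfold gray2real_alt; rw [foldB_outer_eq indiv g_len n]]
    apply List.map_congr_left
    intro i hi
    simp only [List.mem_range] at hi
    have hL := pvGene_length indiv g_len hg i n hi hlen
    exact gene_eq (pvGene indiv g_len i) g_len hg hL
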